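-- pv_equiv track=rewrite | github.com/olivsamuk/BibtexParsing-SystematicReview | plot_modeling.py | update_mf
-- ===== SOURCE A (Python) =====
-- def update_mf(data):
--     modeling_formalisms = {'finite-state automata': 0, 'petri nets': 0, 'finite-state transducer': 0,
--                            'Labeled Transition System (LTS)': 0, 'Markov Models': 0}
--     for each_mf in data.keys():
--         if each_mf == 'finite-state automata':
--             modeling_formalisms['finite-state automata']+=data[each_mf]
--         elif each_mf == 'petri nets':
--             modeling_formalisms['petri nets'] +=data[each_mf]
--         elif each_mf == 'signal interpreted Petri nets':
--             modeling_formalisms['petri nets'] +=data[each_mf]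
--         elif each_mf == 'finite-state transducer':
--             modeling_formalisms['finite-state transducer'] +=data[each_mf]
--         elif each_mf == 'probabilistic finite-state automata':
--             modeling_formalisms['finite-state automata'] +=data[each_mf]
--         elif each_mf == 'Labeled Transition System (LTS)':
--             modeling_formalisms['Labeled Transition System (LTS)'] +=data[each_mf]
--         elif each_mf == 'Hidden Markov Model (HMM)':
--             modeling_formalisms['Markov Models']+=data[each_mf]
--         elif each_mf == 'Stochastic Petri nets':
--             modeling_formalisms['petri nets'] +=data[each_mf]
--         elif each_mf == 'timed finite-state automata':
--             modeling_formalisms['finite-state automata'] +=data[each_mf]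
--         elif each_mf == 'Markov Decision Process (MDP)':
--             modeling_formalisms['Markov Models']+=data[each_mf]
--
--     return modeling_formalisms
-- ===== SOURCE B (Python) =====
-- GROUPS = {
--     'finite-state automata': ['finite-state automata',
--                               'probabilistic finite-state automata',
--                               'timed finite-state automata'],
--     'petri nets': ['petri nets',
--                    'signal interpreted Petri nets',
--                    'Stochastic Petri nets'],
--     'finite-state transducer': ['finite-state transducer'],
--     'Labeled Transition System (LTS)': ['Labeled Transition System (LTS)'],
--     'Markov Models': ['Hidden Markov Model (HMM)',
--                       'Markov Decision Process (MDP)'],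
-- }
--
-- def update_mf(data):
--     return {cat: sum(data.get(k, 0) for k in srcs) for cat, srcs in GROUPS.items()}
-- ===== Notes on version B (the rewrite author's own statement) =====
-- stated objective: simpler
-- what changed: A scans every key of the input dict and dispatches each through a ten-way if/elif chain; B inverts the loop: a static grouping dict maps each of the five output categories to its source keys, and a dict comprehension builds each bucket as sum(data.get(k, 0) for k in srcs), doing a fixed ten lookups regardless of the dict's size.
import Mathlib
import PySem

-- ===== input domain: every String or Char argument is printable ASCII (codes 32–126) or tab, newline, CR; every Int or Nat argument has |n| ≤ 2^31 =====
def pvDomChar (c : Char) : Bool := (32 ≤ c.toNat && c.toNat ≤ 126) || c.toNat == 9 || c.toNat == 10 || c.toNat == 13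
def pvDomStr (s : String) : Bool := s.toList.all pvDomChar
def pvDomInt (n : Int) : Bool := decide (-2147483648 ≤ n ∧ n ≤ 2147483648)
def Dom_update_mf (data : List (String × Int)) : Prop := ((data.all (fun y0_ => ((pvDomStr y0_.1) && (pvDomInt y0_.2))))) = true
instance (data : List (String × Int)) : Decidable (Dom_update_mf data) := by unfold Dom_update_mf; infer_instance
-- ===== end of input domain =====

-- B replaces A's key-scan with its ten-way if/elif dispatch by a static category→source-keys
-- grouping and a dict comprehension summing data.get(k, 0) per category (simpler; and
-- independent of the dict's size: ten lookups instead of a scan of all keys).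

-- ===== PORT A =====
-- A's loop body: the ten-branch if/elif chain over one key of `data`
-- (`g k` transcribes `data[each_mf]`; the key comes from data.keys(), so it is present
-- and the lookup cannot raise — getD with default 0 is exact on every reachable call).
def pvStepA (g : String → Int) (mf : PySem.Dict String Int) (k : String) : PySem.Dict String Int :=
  if k == "finite-state automata" then mf.modify "finite-state automata" 0 (· + g k)
  else if k == "petri nets" then mf.modify "petri nets" 0 (· + g k)
  else if k == "signal interpreted Petri nets" then mf.modify "petri nets" 0 (· + g k)
  else if k == "finite-state transducer" then mf.modify "finite-state transducer" 0 (· + g k)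
  else if k == "probabilistic finite-state automata" then mf.modify "finite-state automata" 0 (· + g k)
  else if k == "Labeled Transition System (LTS)" then mf.modify "Labeled Transition System (LTS)" 0 (· + g k)
  else if k == "Hidden Markov Model (HMM)" then mf.modify "Markov Models" 0 (· + g k)
  else if k == "Stochastic Petri nets" then mf.modify "petri nets" 0 (· + g k)
  else if k == "timed finite-state automata" then mf.modify "finite-state automata" 0 (· + g k)
  else if k == "Markov Decision Process (MDP)" then mf.modify "Markov Models" 0 (· + g k)
  else mf

def update_mf (data : List (String × Int)) : List (String × Int) :=
  let d := PySem.Dict.mk data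
  let init : PySem.Dict String Int :=
    PySem.Dict.mk [("finite-state automata", 0), ("petri nets", 0), ("finite-state transducer", 0),
                   ("Labeled Transition System (LTS)", 0), ("Markov Models", 0)]
  -- `for each_mf in data.keys()`: a dict's keys are the distinct keys in insertion order
  let mf := (PySem.List.dedup (data.map Prod.fst)).foldl (pvStepA (fun k => d.getD k 0)) init
  mf.items

-- ===== PORT B =====
-- the static grouping dict GROUPS of Source B, as (category, source keys) in insertion order
def pvGroups : List (String × List String) :=
  [("finite-state automata", ["finite-state automata", "probabilistic finite-state automata",
                              "timed finite-state automata"]),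
   ("petri nets", ["petri nets", "signal interpreted Petri nets", "Stochastic Petri nets"]),
   ("finite-state transducer", ["finite-state transducer"]),
   ("Labeled Transition System (LTS)", ["Labeled Transition System (LTS)"]),
   ("Markov Models", ["Hidden Markov Model (HMM)", "Markov Decision Process (MDP)"])]

def update_mf_alt (data : List (String × Int)) : List (String × Int) :=
  let d := PySem.Dict.mk data
  -- {cat: sum(data.get(k, 0) for k in srcs) for cat, srcs in GROUPS.items()}
  pvGroups.map (fun cs => (cs.1, (cs.2.map (fun k => d.getD k 0)).sum))

-- ===== PRECONDITION & SPEC =====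
def Spec_update_mf (data : List (String × Int)) (out : List (String × Int)) : Prop := out = update_mf_alt data
instance (data : List (String × Int)) (out : List (String × Int)) : Decidable (Spec_update_mf data out) := by unfold Spec_update_mf; infer_instance

-- ===== CLAIM (what is proved, stated in full; the proofs are below) =====
def Claim_equal_update_mf : Prop := ∀ (data : List (String × Int)), Dom_update_mf data → Spec_update_mf data (update_mf data)

-- ===== LEMMAS AND PROOFS =====

-- the contribution each bucket collects from a key list `ks` under lookup `g`
def pvS1 (g : String → Int) (ks : List String) : Int :=
  (if "finite-state automata" ∈ ks then g "finite-state automata" else 0) +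
  (if "probabilistic finite-state automata" ∈ ks then g "probabilistic finite-state automata" else 0) +
  (if "timed finite-state automata" ∈ ks then g "timed finite-state automata" else 0)
def pvS2 (g : String → Int) (ks : List String) : Int :=
  (if "petri nets" ∈ ks then g "petri nets" else 0) +
  (if "signal interpreted Petri nets" ∈ ks then g "signal interpreted Petri nets" else 0) +
  (if "Stochastic Petri nets" ∈ ks then g "Stochastic Petri nets" else 0)
def pvS3 (g : String → Int) (ks : List String) : Int :=
  if "finite-state transducer" ∈ ks then g "finite-state transducer" else 0
def pvS4 (g : String → Int) (ks : List String) : Int :=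
  if "Labeled Transition System (LTS)" ∈ ks then g "Labeled Transition System (LTS)" else 0
def pvS5 (g : String → Int) (ks : List String) : Int :=
  (if "Hidden Markov Model (HMM)" ∈ ks then g "Hidden Markov Model (HMM)" else 0) +
  (if "Markov Decision Process (MDP)" ∈ ks then g "Markov Decision Process (MDP)" else 0)

lemma pv_sim (g : String → Int) : ∀ (ks : List String), ks.Nodup →
    ∀ (a b c d e : Int),
    (ks.foldl (pvStepA g)
      (PySem.Dict.mk [("finite-state automata", a), ("petri nets", b), ("finite-state transducer", c),
                      ("Labeled Transition System (LTS)", d), ("Markov Models", e)])).items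
    = [("finite-state automata", a + pvS1 g ks), ("petri nets", b + pvS2 g ks),
       ("finite-state transducer", c + pvS3 g ks), ("Labeled Transition System (LTS)", d + pvS4 g ks),
       ("Markov Models", e + pvS5 g ks)] := by
  intro ks
  induction ks with
  | nil =>
    intro _ a b c d e
    simp [pvS1, pvS2, pvS3, pvS4, pvS5]
  | cons k ks ih =>
    intro hnd a b c d e
    obtain ⟨hk, hnd'⟩ := List.nodup_cons.mp hnd
    rw [List.foldl_cons]
    by_cases h1 : k = "finite-state automata"
    · subst h1
      rw [show pvStepA g _ "finite-state automata" =
            PySem.Dict.mk [("finite-state automata", a + g "finite-state automata"), ("petri nets", b),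
                           ("finite-state transducer", c), ("Labeled Transition System (LTS)", d),
                           ("Markov Models", e)] from by
            simp [pvStepA, PySem.Dict.modify, PySem.Dict.get?, PySem.Dict.getD, PySem.Dict.insert,
                  PySem.Dict.contains],
          ih hnd']
      simp [pvS1, pvS2, pvS3, pvS4, pvS5, List.mem_cons, hk]
      try ring
    by_cases h2 : k = "petri nets"
    · subst h2
      rw [show pvStepA g _ "petri nets" =
            PySem.Dict.mk [("finite-state automata", a), ("petri nets", b + g "petri nets"),
                           ("finite-state transducer", c), ("Labeled Transition System (LTS)", d),
                           ("Markov Models", e)] from by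
            simp [pvStepA, PySem.Dict.modify, PySem.Dict.get?, PySem.Dict.getD, PySem.Dict.insert,
                  PySem.Dict.contains],
          ih hnd']
      simp [pvS1, pvS2, pvS3, pvS4, pvS5, List.mem_cons, hk]
      try ring
    by_cases h3 : k = "signal interpreted Petri nets"
    · subst h3
      rw [show pvStepA g _ "signal interpreted Petri nets" =
            PySem.Dict.mk [("finite-state automata", a), ("petri nets", b + g "signal interpreted Petri nets"),
                           ("finite-state transducer", c), ("Labeled Transition System (LTS)", d),
                           ("Markov Models", e)] from by
            simp [pvStepA, PySem.Dict.modify, PySem.Dict.get?, PySem.Dict.getD, PySem.Dict.insert,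
                  PySem.Dict.contains],
          ih hnd']
      simp [pvS1, pvS2, pvS3, pvS4, pvS5, List.mem_cons, hk]
      try ring
    by_cases h4 : k = "finite-state transducer"
    · subst h4
      rw [show pvStepA g _ "finite-state transducer" =
            PySem.Dict.mk [("finite-state automata", a), ("petri nets", b),
                           ("finite-state transducer", c + g "finite-state transducer"),
                           ("Labeled Transition System (LTS)", d), ("Markov Models", e)] from by
            simp [pvStepA, PySem.Dict.modify, PySem.Dict.get?, PySem.Dict.getD, PySem.Dict.insert,
                  PySem.Dict.contains],
          ih hnd']
      simp [pvS1, pvS2, pvS3, pvS4, pvS5, List.mem_cons, hk]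
      try ring
    by_cases h5 : k = "probabilistic finite-state automata"
    · subst h5
      rw [show pvStepA g _ "probabilistic finite-state automata" =
            PySem.Dict.mk [("finite-state automata", a + g "probabilistic finite-state automata"),
                           ("petri nets", b), ("finite-state transducer", c),
                           ("Labeled Transition System (LTS)", d), ("Markov Models", e)] from by
            simp [pvStepA, PySem.Dict.modify, PySem.Dict.get?, PySem.Dict.getD, PySem.Dict.insert,
                  PySem.Dict.contains],
          ih hnd']
      simp [pvS1, pvS2, pvS3, pvS4, pvS5, List.mem_cons, hk]
      try ring
    by_cases h6 : k = "Labeled Transition System (LTS)"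
    · subst h6
      rw [show pvStepA g _ "Labeled Transition System (LTS)" =
            PySem.Dict.mk [("finite-state automata", a), ("petri nets", b), ("finite-state transducer", c),
                           ("Labeled Transition System (LTS)", d + g "Labeled Transition System (LTS)"),
                           ("Markov Models", e)] from by
            simp [pvStepA, PySem.Dict.modify, PySem.Dict.get?, PySem.Dict.getD, PySem.Dict.insert,
                  PySem.Dict.contains],
          ih hnd']
      simp [pvS1, pvS2, pvS3, pvS4, pvS5, List.mem_cons, hk]
      try ring
    by_cases h7 : k = "Hidden Markov Model (HMM)"
    · subst h7
      rw [show pvStepA g _ "Hidden Markov Model (HMM)" =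
            PySem.Dict.mk [("finite-state automata", a), ("petri nets", b), ("finite-state transducer", c),
                           ("Labeled Transition System (LTS)", d),
                           ("Markov Models", e + g "Hidden Markov Model (HMM)")] from by
            simp [pvStepA, PySem.Dict.modify, PySem.Dict.get?, PySem.Dict.getD, PySem.Dict.insert,
                  PySem.Dict.contains],
          ih hnd']
      simp [pvS1, pvS2, pvS3, pvS4, pvS5, List.mem_cons, hk]
      try ring
    by_cases h8 : k = "Stochastic Petri nets"
    · subst h8
      rw [show pvStepA g _ "Stochastic Petri nets" =
            PySem.Dict.mk [("finite-state automata", a), ("petri nets", b + g "Stochastic Petri nets"),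
                           ("finite-state transducer", c), ("Labeled Transition System (LTS)", d),
                           ("Markov Models", e)] from by
            simp [pvStepA, PySem.Dict.modify, PySem.Dict.get?, PySem.Dict.getD, PySem.Dict.insert,
                  PySem.Dict.contains],
          ih hnd']
      simp [pvS1, pvS2, pvS3, pvS4, pvS5, List.mem_cons, hk]
      try ring
    by_cases h9 : k = "timed finite-state automata"
    · subst h9
      rw [show pvStepA g _ "timed finite-state automata" =
            PySem.Dict.mk [("finite-state automata", a + g "timed finite-state automata"), ("petri nets", b),
                           ("finite-state transducer", c), ("Labeled Transition System (LTS)", d),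
                           ("Markov Models", e)] from by
            simp [pvStepA, PySem.Dict.modify, PySem.Dict.get?, PySem.Dict.getD, PySem.Dict.insert,
                  PySem.Dict.contains],
          ih hnd']
      simp [pvS1, pvS2, pvS3, pvS4, pvS5, List.mem_cons, hk]
      try ring
    by_cases h10 : k = "Markov Decision Process (MDP)"
    · subst h10
      rw [show pvStepA g _ "Markov Decision Process (MDP)" =
            PySem.Dict.mk [("finite-state automata", a), ("petri nets", b), ("finite-state transducer", c),
                           ("Labeled Transition System (LTS)", d),
                           ("Markov Models", e + g "Markov Decision Process (MDP)")] from by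
            simp [pvStepA, PySem.Dict.modify, PySem.Dict.get?, PySem.Dict.getD, PySem.Dict.insert,
                  PySem.Dict.contains],
          ih hnd']
      simp [pvS1, pvS2, pvS3, pvS4, pvS5, List.mem_cons, hk]
      try ring
    · rw [show pvStepA g
            (PySem.Dict.mk [("finite-state automata", a), ("petri nets", b), ("finite-state transducer", c),
                            ("Labeled Transition System (LTS)", d), ("Markov Models", e)]) k =
            PySem.Dict.mk [("finite-state automata", a), ("petri nets", b), ("finite-state transducer", c),
                           ("Labeled Transition System (LTS)", d), ("Markov Models", e)] from by
            simp [pvStepA, h1, h2, h3, h4, h5, h6, h7, h8, h9, h10],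
          ih hnd']
      simp [pvS1, pvS2, pvS3, pvS4, pvS5, List.mem_cons,
            Ne.symm h1, Ne.symm h2, Ne.symm h3, Ne.symm h4, Ne.symm h5,
            Ne.symm h6, Ne.symm h7, Ne.symm h8, Ne.symm h9, Ne.symm h10]

lemma pv_absent (data : List (String × Int)) (s : String) (h : s ∉ data.map Prod.fst) :
    (PySem.Dict.mk data).getD s 0 = 0 := by
  apply PySem.Dict.getD_of_not_contains
  simp only [PySem.Dict.contains_mk, List.any_eq_false]
  intro p hp hps
  exact h (List.mem_map.mpr ⟨p, hp, by simpa using hps⟩)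

-- an `if s ∈ dedup keys` guard around `getD s 0` is redundant: absent keys look up to 0
lemma pv_guard (data : List (String × Int)) (s : String) :
    (if s ∈ PySem.List.dedup (data.map Prod.fst) then (PySem.Dict.mk data).getD s 0 else 0)
      = (PySem.Dict.mk data).getD s 0 := by
  by_cases h : s ∈ data.map Prod.fst
  · simp [h]
  · simp [h, pv_absent data s h]

-- ===== VERDICT (by name: the statement is the Claim_ definition above) =====
theorem update_mf_spec : Claim_equal_update_mf := by
  intro data _
  unfold Spec_update_mf update_mf update_mf_alt
  rw [pv_sim (fun k => (PySem.Dict.mk data).getD k 0) _ (PySem.List.nodup_dedup _)]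
  simp only [pvGroups, pvS1, pvS2, pvS3, pvS4, pvS5, List.map_cons, List.map_nil,
             List.sum_cons, List.sum_nil, pv_guard]
  ring_nf
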